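-- pv_equiv track=rewrite | github.com/chrisiweb/Parhamer_connection | work_with_content.py | prepare_content_for_hide_show_items
-- ===== SOURCE A (Python) =====
-- def merge_list_to_string(list_):
--     combined_string = ""
--     for all in list_:
--         item_short = all.replace("ITEM", "")
--         if item_short.isspace() == True or not item_short:
--             combined_string = combined_string + all
--         else:
--             combined_string = combined_string + all + "\n"
--     return combined_string
--
-- def prepare_content_for_hide_show_items(content):
--     index = 0
--     temp_list = []
--     temp_content = []
--     for item in content:
--         if item.startswith("ITEM") and temp_list != []:
--             combined_string = merge_list_to_string(temp_list)
--             temp_content.append(combined_string)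
--             temp_list = []
--             temp_list.append(item)
--         else:
--             temp_list.append(item)
--
--     combined_string = merge_list_to_string(temp_list)
--     temp_content.append(combined_string)
--
--     return temp_content
-- ===== SOURCE B (Python) =====
-- def _render(group):
--     return "".join(x if not x.replace("ITEM", "").strip() else x + "\n"
--                    for x in group)
--
--
-- def prepare_content_for_hide_show_items(content):
--     k = 1
--     while k < len(content) and not content[k].startswith("ITEM"):
--         k += 1
--     if k < len(content):
--         return [_render(content[:k])] + prepare_content_for_hide_show_items(content[k:])
--     return [_render(content)]
-- ===== Notes on version B (the rewrite author's own statement) =====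
-- stated objective: faster
-- what changed: B is recursive divide-at-first-marker: it finds the first marker index past the head, renders that prefix with a join of per-item pieces and recurses on the suffix, replacing A's stateful accumulator loop whose helper builds each chunk by repeated string concatenation.
import Mathlib
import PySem

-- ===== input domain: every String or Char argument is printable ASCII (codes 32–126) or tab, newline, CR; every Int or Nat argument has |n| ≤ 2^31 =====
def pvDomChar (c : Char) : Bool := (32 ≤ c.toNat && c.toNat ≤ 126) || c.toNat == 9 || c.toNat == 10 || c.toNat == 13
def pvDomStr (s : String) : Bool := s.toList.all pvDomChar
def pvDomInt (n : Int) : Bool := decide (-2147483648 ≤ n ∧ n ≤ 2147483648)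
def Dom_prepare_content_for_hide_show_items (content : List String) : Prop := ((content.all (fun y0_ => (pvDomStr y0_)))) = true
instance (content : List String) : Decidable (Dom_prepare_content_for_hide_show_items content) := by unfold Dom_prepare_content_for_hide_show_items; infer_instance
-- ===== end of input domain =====

-- B recursively splits the list at the first marker past the head and renders each
-- prefix with a join of per-item pieces, instead of A's stateful accumulator loop
-- with an interleaved string-building helper (objective: alternative decomposition).

-- ===== PORT A =====
-- literal port of merge_list_to_string
def merge_list_to_string (list_ : List String) : String :=
  list_.foldl (fun combined_string all_ =>
    let item_short := PySem.Str.replace all_ "ITEM" ""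
    if PySem.Str.strIsspace item_short = true ∨ item_short = "" then
      combined_string ++ all_
    else
      combined_string ++ all_ ++ "\n") ""

def prepare_content_for_hide_show_items (content : List String) : List String :=
  let st := content.foldl (fun (s : List String × List String) item =>
    if PySem.Str.startswith item "ITEM" = true ∧ s.1 ≠ [] then
      (([item] : List String), s.2 ++ [merge_list_to_string s.1])
    else
      (s.1 ++ [item], s.2)) (([], []) : List String × List String)
  st.2 ++ [merge_list_to_string st.1]

-- ===== PORT B =====
-- port of Source B's _render: join of per-item pieces
def pvPiece (item : String) : String :=
  if PySem.Str.strip (PySem.Str.replace item "ITEM" "") = "" then item else item ++ "\n"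

def pvRender (g : List String) : String := PySem.Str.join "" (g.map pvPiece)

-- Source B's while loop computes the first index k ≥ 1 with content[k].startswith("ITEM");
-- content[:k] / content[k:] is exactly the takeWhile/dropWhile span of the tail.
def prepare_content_for_hide_show_items_alt : List String → List String
  | [] => [pvRender []]
  | x :: xs =>
    if xs.dropWhile (fun y => !(PySem.Str.startswith y "ITEM")) = [] then [pvRender (x :: xs)]
    else pvRender (x :: xs.takeWhile (fun y => !(PySem.Str.startswith y "ITEM")))
           :: prepare_content_for_hide_show_items_alt
                (xs.dropWhile (fun y => !(PySem.Str.startswith y "ITEM")))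
  termination_by content => content.length
  decreasing_by
    simp only [List.length_cons]
    exact Nat.lt_succ_of_le (List.length_dropWhile_le _ _)

-- ===== PRECONDITION & SPEC =====
def Spec_prepare_content_for_hide_show_items (content : List String) (out : List String) : Prop := out = prepare_content_for_hide_show_items_alt content
instance (content : List String) (out : List String) : Decidable (Spec_prepare_content_for_hide_show_items content out) := by unfold Spec_prepare_content_for_hide_show_items; infer_instance

-- ===== CLAIM (what is proved, stated in full; the proofs are below) =====
def Claim_equal_prepare_content_for_hide_show_items : Prop := ∀ (content : List String), Dom_prepare_content_for_hide_show_items content → Spec_prepare_content_for_hide_show_items content (prepare_content_for_hide_show_items content)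

-- ===== LEMMAS AND PROOFS =====

theorem pv_str_ext {s t : String} (h : s.toList = t.toList) : s = t := by
  have := congrArg String.ofList h
  simpa using this

theorem pv_str_empty_iff (s : String) : s = "" ↔ s.toList = [] := by
  constructor
  · intro h; simp [h]
  · intro h; exact pv_str_ext (by simp [h])

theorem pv_app_assoc (a b c : String) : a ++ b ++ c = a ++ (b ++ c) := by
  apply pv_str_ext
  simp [String.toList_append, List.append_assoc]

theorem pv_empty_app (a : String) : "" ++ a = a := by
  apply pv_str_ext
  simp

-- Chars.strip is empty exactly when every character is whitespace
theorem pv_chars_strip_eq_nil (cs : List Char) :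
    PySem.Chars.strip cs = [] ↔ ∀ x ∈ cs, PySem.Chars.isspace x = true := by
  constructor
  · intro h x hx
    by_cases hp : PySem.Chars.isspace x = true
    · exact hp
    · exfalso
      have hx' : x ∈ List.dropWhile PySem.Chars.isspace cs := by
        rcases List.mem_append.mp
            (by rw [List.takeWhile_append_dropWhile (p := PySem.Chars.isspace) (l := cs)]
                exact hx) with h1 | h1
        · exact absurd (List.mem_takeWhile_imp h1) hp
        · exact h1
      have h2 : List.dropWhile PySem.Chars.isspace
          ((List.dropWhile PySem.Chars.isspace cs).reverse) = [] := by
        have := congrArg List.reverse h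
        simpa [PySem.Chars.strip, PySem.Chars.lstrip, PySem.Chars.rstrip] using this
      exact hp ((List.dropWhile_eq_nil_iff.mp h2) x (by simpa using hx'))
  · intro h
    have h1 : List.dropWhile PySem.Chars.isspace cs = [] := List.dropWhile_eq_nil_iff.mpr h
    simp [PySem.Chars.strip, PySem.Chars.lstrip, PySem.Chars.rstrip, h1]

-- strip r = "" exactly when r is all-whitespace or empty (A's branch condition)
theorem pv_strip_empty_iff (s : String) :
    PySem.Str.strip s = "" ↔ (PySem.Str.strIsspace s = true ∨ s = "") := by
  have key : PySem.Str.strip s = "" ↔ PySem.Chars.strip s.toList = [] := by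
    rw [PySem.Str.strip, pv_str_empty_iff]
    simp [String.toList_ofList]
  rw [key, pv_chars_strip_eq_nil, pv_str_empty_iff, PySem.Str.strIsspace]
  cases hcs : s.toList with
  | nil => simp
  | cons a l =>
      simp [PySem.Chars.strIsspace, List.all_eq_true]

theorem pv_join_cons (a : String) (rest : List String) :
    PySem.Str.join "" (a :: rest) = a ++ PySem.Str.join "" rest := by
  cases rest with
  | nil =>
      apply pv_str_ext
      simp [PySem.Str.join, PySem.Chars.join_singleton, PySem.Chars.join_nil]
  | cons b r =>
      apply pv_str_ext
      simp [PySem.Str.join, PySem.Chars.join_cons_cons, String.toList_append,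
        String.toList_ofList]

theorem pv_merge_aux (l : List String) (acc : String) :
    l.foldl (fun combined_string all_ =>
      let item_short := PySem.Str.replace all_ "ITEM" ""
      if PySem.Str.strIsspace item_short = true ∨ item_short = "" then
        combined_string ++ all_
      else
        combined_string ++ all_ ++ "\n") acc
    = acc ++ pvRender l := by
  induction l generalizing acc with
  | nil =>
      simp only [List.foldl_nil, pvRender, List.map_nil]
      apply pv_str_ext
      simp [PySem.Str.join, PySem.Chars.join_nil]
  | cons x l ih =>
      simp only [List.foldl_cons, pvRender, List.map_cons] at *
      rw [ih, pv_join_cons, ← pv_app_assoc]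
      congr 1
      show (if PySem.Str.strIsspace (PySem.Str.replace x "ITEM" "") = true ∨
              PySem.Str.replace x "ITEM" "" = "" then acc ++ x else acc ++ x ++ "\n")
           = acc ++ pvPiece x
      rw [pvPiece]
      by_cases h : PySem.Str.strip (PySem.Str.replace x "ITEM" "") = ""
      · rw [if_pos ((pv_strip_empty_iff _).mp h), if_pos h]
      · rw [if_neg (fun hc => h ((pv_strip_empty_iff _).mpr hc)), if_neg h, pv_app_assoc]

theorem pv_merge_eq (l : List String) : merge_list_to_string l = pvRender l := by
  rw [merge_list_to_string, pv_merge_aux, pv_empty_app]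

-- unfolding of B's port on a cons, in split form (takeWhile = whole tail when no cut)
theorem pv_alt_cons (x : String) (xs : List String) :
    prepare_content_for_hide_show_items_alt (x :: xs)
    = pvRender (x :: xs.takeWhile (fun y => !(PySem.Str.startswith y "ITEM")))
        :: (if xs.dropWhile (fun y => !(PySem.Str.startswith y "ITEM")) = [] then []
            else prepare_content_for_hide_show_items_alt
                   (xs.dropWhile (fun y => !(PySem.Str.startswith y "ITEM")))) := by
  rw [prepare_content_for_hide_show_items_alt]
  by_cases h : xs.dropWhile (fun y => !(PySem.Str.startswith y "ITEM")) = []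
  · have ht : xs.takeWhile (fun y => !(PySem.Str.startswith y "ITEM")) = xs := by
      have := List.takeWhile_append_dropWhile
        (p := fun y => !(PySem.Str.startswith y "ITEM")) (l := xs)
      rw [h, List.append_nil] at this
      exact this
    rw [if_pos h, if_pos h, ht]
  · rw [if_neg h, if_neg h]

-- main invariant: running A's fold from a non-empty current group equals
-- "acc, then render of the extended first group, then B on the suffix"
theorem pv_runA (xs : List String) (cur : List String) (acc : List String) (h : cur ≠ []) :
    (let st := xs.foldl (fun (s : List String × List String) item =>
        if PySem.Str.startswith item "ITEM" = true ∧ s.1 ≠ [] then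
          (([item] : List String), s.2 ++ [merge_list_to_string s.1])
        else
          (s.1 ++ [item], s.2)) (cur, acc)
     st.2 ++ [merge_list_to_string st.1])
    = acc ++ pvRender (cur ++ xs.takeWhile (fun y => !(PySem.Str.startswith y "ITEM")))
        :: (if xs.dropWhile (fun y => !(PySem.Str.startswith y "ITEM")) = [] then []
            else prepare_content_for_hide_show_items_alt
                   (xs.dropWhile (fun y => !(PySem.Str.startswith y "ITEM")))) := by
  induction xs generalizing cur acc with
  | nil =>
      simp [pv_merge_eq]
  | cons y ys ih =>
      by_cases hc : PySem.Str.startswith y "ITEM" = true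
      · have hcond : (PySem.Str.startswith y "ITEM" = true ∧ cur ≠ []) := ⟨hc, h⟩
        have hbf : (!PySem.Str.startswith y "ITEM") = false := by rw [hc]; rfl
        simp only [List.foldl_cons, if_pos hcond, List.dropWhile_cons, List.takeWhile_cons,
          hbf, Bool.false_eq_true, if_false, reduceCtorEq]
        rw [pv_alt_cons, ih [y] (acc ++ [merge_list_to_string cur]) (by simp)]
        simp [pv_merge_eq, List.append_assoc]
      · have hcb : PySem.Str.startswith y "ITEM" = false := by
          cases hv : PySem.Str.startswith y "ITEM" <;> simp_all
        have hcond : ¬ (PySem.Str.startswith y "ITEM" = true ∧ cur ≠ []) := fun hh => hc hh.1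
        simp only [List.foldl_cons, if_neg hcond]
        rw [ih (cur ++ [y]) acc (by simp)]
        have hb : (!PySem.Str.startswith y "ITEM") = true := by rw [hcb]; rfl
        simp only [List.takeWhile_cons, List.dropWhile_cons, hb, if_true,
          List.append_assoc, List.cons_append, List.nil_append]

-- ===== VERDICT (by name: the statement is the Claim_ definition above) =====
theorem prepare_content_for_hide_show_items_spec : Claim_equal_prepare_content_for_hide_show_items := by
  intro content _
  show _ = _
  cases content with
  | nil =>
      simp [prepare_content_for_hide_show_items, prepare_content_for_hide_show_items_alt,
        pv_merge_eq]
  | cons x xs =>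
      unfold prepare_content_for_hide_show_items
      simp only [List.foldl_cons]
      have h0 : (if PySem.Str.startswith x "ITEM" = true ∧ ([] : List String) ≠ [] then
          (([x] : List String), ([] : List String) ++ [merge_list_to_string []])
        else (([] : List String) ++ [x], ([] : List String))) = (([x] : List String), ([] : List String)) := by
        simp
      rw [h0, pv_runA xs [x] [] (by simp), pv_alt_cons]
      simp
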